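-- pv_equiv track=rewrite | github.com/CMAP-REPOS/cmap_trip-based_model | src/Mode-Dest-TOD/cmap_modedest/application.py | stagger_starts
-- ===== SOURCE A (Python) =====
-- def stagger_starts(iterable, delay=3, n_jobs=4):
--     pause = 0
--     for n, i in enumerate(iterable, start=1):
--         yield (pause, i)
--         if n >= n_jobs:
--             pause = 0
--         else:
--             pause += delay
-- ===== SOURCE B (Python) =====
-- def stagger_starts(iterable, delay=3, n_jobs=4):
--     # Two-phase: materialize the items, build the whole pause table up front
--     # (index m gets delay*m while m < n_jobs, else 0), then zip.
--     items = list(iterable)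
--     pauses = [delay * m if m < n_jobs else 0 for m in range(len(items))]
--     yield from zip(pauses, items)
-- ===== Notes on version B (the rewrite author's own statement) =====
-- stated objective: alternative
-- what changed: Replaces A's single stateful loop with a running pause accumulator (incremented and reset in-flight) by a stateless two-phase construction: precompute the full pause table from the index (delay*m while m < n_jobs, else 0) and zip it with the items.
import Mathlib
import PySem

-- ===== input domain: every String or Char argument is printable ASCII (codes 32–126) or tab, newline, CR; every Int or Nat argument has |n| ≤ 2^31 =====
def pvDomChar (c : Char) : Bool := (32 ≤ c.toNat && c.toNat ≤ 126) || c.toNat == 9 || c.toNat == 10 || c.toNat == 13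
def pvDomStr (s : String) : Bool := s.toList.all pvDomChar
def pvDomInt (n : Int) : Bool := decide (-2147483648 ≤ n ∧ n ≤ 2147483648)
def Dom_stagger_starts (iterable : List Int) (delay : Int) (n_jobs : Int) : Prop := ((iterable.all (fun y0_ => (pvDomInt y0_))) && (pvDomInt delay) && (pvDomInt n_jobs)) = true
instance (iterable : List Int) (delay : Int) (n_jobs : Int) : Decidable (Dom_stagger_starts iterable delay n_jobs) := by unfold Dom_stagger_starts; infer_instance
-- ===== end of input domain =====

-- B replaces A's stateful running-pause loop with a stateless two-phase build:
-- precompute the pause table from the index, then zip it with the items (alternative decomposition).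


-- ===== PORT A =====
-- loop over enumerate(iterable, start=1), carrying the running `pause` state
def staggerLoopA (delay n_jobs : Int) : List Int → Int → Int → List (Int × Int)
  | [], _, _ => []
  | i :: rest, n, pause =>
      (pause, i) :: staggerLoopA delay n_jobs rest (n + 1) (if n ≥ n_jobs then 0 else pause + delay)

def stagger_starts (iterable : List Int) (delay : Int) (n_jobs : Int) : List (Int × Int) :=
  staggerLoopA delay n_jobs iterable 1 0

-- ===== PORT B =====
-- two-phase: build the pause table over range(len(items)), then zip with the items
def stagger_starts_alt (iterable : List Int) (delay : Int) (n_jobs : Int) : List (Int × Int) :=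
  let pauses := (List.range iterable.length).map
    (fun (m : Nat) => if (m : Int) < n_jobs then delay * (m : Int) else 0)
  pauses.zip iterable

-- ===== PRECONDITION & SPEC =====
def Spec_stagger_starts (iterable : List Int) (delay : Int) (n_jobs : Int) (out : List (Int × Int)) : Prop := out = stagger_starts_alt iterable delay n_jobs
instance (iterable : List Int) (delay : Int) (n_jobs : Int) (out : List (Int × Int)) : Decidable (Spec_stagger_starts iterable delay n_jobs out) := by unfold Spec_stagger_starts; infer_instance

-- ===== CLAIM (what is proved, stated in full; the proofs are below) =====
def Claim_equal_stagger_starts : Prop := ∀ (iterable : List Int) (delay : Int) (n_jobs : Int), Dom_stagger_starts iterable delay n_jobs → Spec_stagger_starts iterable delay n_jobs (stagger_starts iterable delay n_jobs)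

-- ===== LEMMAS AND PROOFS =====
theorem staggerLoopA_len (delay n_jobs : Int) (l : List Int) (n pause : Int) :
    (staggerLoopA delay n_jobs l n pause).length = l.length := by
  induction l generalizing n pause with
  | nil => rfl
  | cons i rest ih => simp [staggerLoopA, ih]

theorem staggerLoopA_get (delay n_jobs : Int) (l : List Int) :
    ∀ (n : Int) (m : Nat) (hm : m < l.length),
      (staggerLoopA delay n_jobs l n (if n ≤ n_jobs then delay * (n - 1) else 0))[m]'(by
          rw [staggerLoopA_len]; exact hm)
        = ((if (n + m) ≤ n_jobs then delay * (n + m - 1) else 0), l[m]'hm) := by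
  induction l with
  | nil => intro n m hm; simp at hm
  | cons i rest ih =>
      intro n m hm
      simp only [staggerLoopA]
      have hstep : (if n ≥ n_jobs then 0 else (if n ≤ n_jobs then delay * (n - 1) else 0) + delay)
          = (if n + 1 ≤ n_jobs then delay * (n + 1 - 1) else 0) := by
        split_ifs with h1 h2 h3 <;> try omega
        · ring
      cases m with
      | zero => simp
      | succ k =>
          have hk : k < rest.length := by simpa using hm
          simp only [List.getElem_cons_succ, hstep]
          rw [ih (n + 1) k hk]
          have h3 : n + 1 + (k : Int) = n + ((k : Nat) + 1 : Nat) := by push_cast; ring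
          rw [h3]

theorem staggerLoopA_start (delay n_jobs : Int) (l : List Int) :
    staggerLoopA delay n_jobs l 1 0
      = staggerLoopA delay n_jobs l 1 (if (1 : Int) ≤ n_jobs then delay * (1 - 1) else 0) := by
  congr 1
  split_ifs <;> ring

-- ===== VERDICT (by name: the statement is the Claim_ definition above) =====
theorem stagger_starts_spec : Claim_equal_stagger_starts := by
  intro iterable delay n_jobs _
  unfold Spec_stagger_starts stagger_starts stagger_starts_alt
  rw [staggerLoopA_start]
  apply List.ext_getElem
  · simp [staggerLoopA_len]
  · intro m h1 h2
    have hm : m < iterable.length := by simpa [staggerLoopA_len] using h1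
    rw [staggerLoopA_get delay n_jobs iterable 1 m hm]
    simp only [List.getElem_zip, List.getElem_map, List.getElem_range]
    congr 1
    split_ifs with ha hb hb
    · ring
    · exfalso; omega
    · exfalso; omega
    · rfl
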